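-- pv_equiv track=rewrite | github.com/yankai1996/DB-Benchmark | db_bench.py | extract_config_path
-- ===== SOURCE A (Python) =====
-- from typing import Any, Callable, Dict, List, Optional, Tuple
--
-- def extract_config_path(argv: List[str]) -> Tuple[Optional[str], List[str]]:
--     """Remove -c/--config PATH from argv; return (path, remaining argv for main parser)."""
--     out: List[str] = []
--     i = 0
--     cfg: Optional[str] = None
--     while i < len(argv):
--         a = argv[i]
--         if a in ("-c", "--config"):
--             if i + 1 >= len(argv):
--                 raise SystemExit(f"{a} requires a file path")
--             cfg = argv[i + 1]
--             i += 2
--             continue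
--         if a.startswith("--config="):
--             cfg = a.split("=", 1)[1]
--             if not cfg:
--                 raise SystemExit("--config= requires a non-empty path")
--             i += 1
--             continue
--         out.append(a)
--         i += 1
--     return cfg, out
-- ===== SOURCE B (Python) =====
-- def extract_config_path(argv):
--     """Remove -c/--config PATH from argv; return (path, remaining argv for main parser)."""
--     out = []
--     cfg = None
--     pending = None  # flag token whose value is awaited
--     for a in argv:
--         if pending is not None:
--             cfg = a
--             pending = None
--         elif a in ("-c", "--config"):
--             pending = a
--         elif a.startswith("--config="):
--             cfg = a.split("=", 1)[1]
--             if not cfg: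
--                 raise SystemExit("--config= requires a non-empty path")
--         else:
--             out.append(a)
--     if pending is not None:
--         raise SystemExit(f"{pending} requires a file path")
--     return cfg, out
-- ===== Notes on version B (the rewrite author's own statement) =====
-- stated objective: alternative
-- what changed: Replaced A's index-based while-loop that looks ahead with argv[i+1] and jumps i by 2 with a single for-loop state machine over the elements, carrying a 'pending' slot that holds a flag token awaiting its value; it avoids per-iteration len() and indexing.
import Mathlib
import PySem

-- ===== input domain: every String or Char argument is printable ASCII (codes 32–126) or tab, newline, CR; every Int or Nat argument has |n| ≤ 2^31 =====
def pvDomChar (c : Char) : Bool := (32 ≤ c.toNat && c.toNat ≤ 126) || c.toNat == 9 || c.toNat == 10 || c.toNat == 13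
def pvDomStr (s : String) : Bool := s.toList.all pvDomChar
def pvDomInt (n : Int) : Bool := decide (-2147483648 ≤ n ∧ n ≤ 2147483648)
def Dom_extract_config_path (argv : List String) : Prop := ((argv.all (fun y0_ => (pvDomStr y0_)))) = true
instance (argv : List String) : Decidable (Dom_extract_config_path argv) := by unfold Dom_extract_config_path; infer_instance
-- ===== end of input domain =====

-- B replaces A's index-based while-loop with two-step lookahead by a one-pass state machine
-- over the elements ('pending' holds an awaiting flag); same values, same cost (objective: alternative).

-- ===== PORT A =====
-- literal port of A's while loop: index i walks argv, a flag consumes the next element.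
-- Where Python raises SystemExit (dangling flag, bare "--config=") the port returns the
-- current (cfg, out); those inputs are excluded by Pre_.
def extract_config_path_go : List String → Option String → List String → Option String × List String
  | [], cfg, out => (cfg, out)
  | a :: rest, cfg, out =>
    if a = "-c" ∨ a = "--config" then
      match rest with
      | [] => (cfg, out)      -- raise SystemExit(f"{a} requires a file path")
      | v :: rest' => extract_config_path_go rest' (some v) out
    else if PySem.Str.startswith a "--config=" then
      let c := ((PySem.Str.splitMax? a "=" 1).getD []).getD 1 ""   -- a.split("=", 1)[1]
      if c = "" then (cfg, out)  -- raise SystemExit("--config= requires a non-empty path")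
      else extract_config_path_go rest (some c) out
    else extract_config_path_go rest cfg (out ++ [a])

def extract_config_path (argv : List String) : Option String × List String :=
  extract_config_path_go argv none []

-- ===== PORT B =====
-- state: (pending, cfg, out)
def extract_config_path_step (st : Option String × Option String × List String) (a : String) :
    Option String × Option String × List String :=
  match st with
  | (some _, _, out) => (none, some a, out)
  | (none, cfg, out) =>
    if a = "-c" ∨ a = "--config" then (some a, cfg, out)
    else if PySem.Str.startswith a "--config=" then
      let c := ((PySem.Str.splitMax? a "=" 1).getD []).getD 1 ""   -- a.split("=", 1)[1]
      -- Python raises SystemExit here when c = "" (excluded by Pre_)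
      (none, some c, out)
    else (none, cfg, out ++ [a])

def extract_config_path_alt (argv : List String) : Option String × List String :=
  let st := argv.foldl extract_config_path_step (none, none, [])
  -- Python raises SystemExit here when st.1 ≠ none (dangling flag, excluded by Pre_)
  (st.2.1, st.2.2)

-- ===== PRECONDITION & SPEC =====
def pvIsFlag (a : String) : Bool := a = "-c" ∨ a = "--config"

-- length of the maximal run of flag tokens immediately before position i
def pvRunBefore (argv : List String) (i : Nat) : Nat :=
  ((argv.take i).reverse.takeWhile pvIsFlag).length

-- Pre_ excludes exactly the inputs on which A raises SystemExit: a dangling flag at the end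
-- of argv (a trailing run of "-c"/"--config" tokens of odd length, so the last flag has no
-- value position), and a bare "--config=" token that is not swallowed as some flag's value
-- (the flag run immediately before it has even length), whose path part is empty.
def Pre_extract_config_path (argv : List String) : Prop :=
  (∀ i, i < argv.length → argv.getD i "" = "--config=" → pvRunBefore argv i % 2 = 1) ∧
  pvRunBefore argv argv.length % 2 = 0
instance (argv : List String) : Decidable (Pre_extract_config_path argv) := by
  unfold Pre_extract_config_path; infer_instance

def pvWitness_extract_config_path : List String := ["-c", "cfg.json", "--config=a=b", "x"]

def Spec_extract_config_path (argv : List String) (out : Option String × List String) : Prop :=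
  out = extract_config_path_alt argv
instance (argv : List String) (out : Option String × List String) :
    Decidable (Spec_extract_config_path argv out) := by
  unfold Spec_extract_config_path; infer_instance

-- ===== CLAIM (what is proved, stated in full; the proofs are below) =====
def Claim_equal_extract_config_path : Prop :=
  ∀ (argv : List String), Dom_extract_config_path argv → Pre_extract_config_path argv →
    Spec_extract_config_path argv (extract_config_path argv)

-- ===== LEMMAS AND PROOFS =====

-- the raising-free inputs, as A's left-to-right scan sees them (proof-side helper)
def pvOkCfg : List String → Bool
  | [] => true
  | a :: rest =>
    if a = "-c" ∨ a = "--config" then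
      match rest with
      | [] => false
      | _ :: rest' => pvOkCfg rest'
    else if a = "--config=" then false
    else pvOkCfg rest

-- appending a flag-free element does not extend a flag run
theorem pvStop_one (xs : List String) (a : String) (ha : pvIsFlag a = false) :
    (xs ++ [a]).takeWhile pvIsFlag = xs.takeWhile pvIsFlag := by
  induction xs with
  | nil => simp [ha]
  | cons x xs ih =>
    by_cases hx : pvIsFlag x = true
    · simp [hx, ih]
    · simp at hx; simp [hx]

-- appending one element and then a flag preserves the parity of the flag run
theorem pvParity_two (xs : List String) (v a : String) (ha : pvIsFlag a = true) :
    ((xs ++ [v, a]).takeWhile pvIsFlag).length % 2 = (xs.takeWhile pvIsFlag).length % 2 := by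
  induction xs with
  | nil =>
    by_cases hv : pvIsFlag v = true
    · simp [hv, ha]
    · simp at hv; simp [hv]
  | cons x xs ih =>
    by_cases hx : pvIsFlag x = true
    · simp only [List.cons_append, List.takeWhile_cons, hx, if_true, List.length_cons]
      omega
    · simp at hx
      simp [List.cons_append, hx]

-- the closed-form precondition implies that A's scan never reaches a raise
theorem pvPre_ok : ∀ (argv : List String), Pre_extract_config_path argv → pvOkCfg argv = true
  | [], _ => rfl
  | a :: rest, ⟨hcfg, htail⟩ => by
    by_cases hf : a = "-c" ∨ a = "--config"
    · have haf : pvIsFlag a = true := by simp [pvIsFlag, hf]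
      cases rest with
      | nil =>
        exfalso
        simp [pvRunBefore, haf] at htail
      | cons v rest' =>
        unfold pvOkCfg
        rw [if_pos hf]
        apply pvPre_ok rest'
        constructor
        · intro i hi hieq
          have h2 := hcfg (i + 2) (by simpa using hi) (by simpa using hieq)
          have e : pvRunBefore (a :: v :: rest') (i + 2) % 2 = pvRunBefore rest' i % 2 := by
            simp only [pvRunBefore, List.take_succ_cons, List.reverse_cons, List.append_assoc]
            simpa using pvParity_two ((rest'.take i).reverse) v a haf
          rw [e] at h2
          exact h2
        · have h2 := htail
          have e : pvRunBefore (a :: v :: rest') ((a :: v :: rest').length) % 2 =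
              pvRunBefore rest' rest'.length % 2 := by
            simp only [pvRunBefore, List.length_cons, List.take_succ_cons, List.take_length,
              List.reverse_cons, List.append_assoc]
            simpa using pvParity_two rest'.reverse v a haf
          rw [e] at h2
          exact h2
    · have haf : pvIsFlag a = false := by simp [pvIsFlag, hf]
      have hne : a ≠ "--config=" := by
        intro hEq
        have h0 := hcfg 0 (by simp) (by simp [hEq])
        simp [pvRunBefore] at h0
      unfold pvOkCfg
      rw [if_neg hf, if_neg hne]
      apply pvPre_ok rest
      constructor
      · intro i hi hieq
        have h1 := hcfg (i + 1) (by simpa using hi) (by simpa using hieq)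
        have e : pvRunBefore (a :: rest) (i + 1) = pvRunBefore rest i := by
          simp only [pvRunBefore, List.take_succ_cons, List.reverse_cons]
          rw [pvStop_one _ _ haf]
        rw [e] at h1
        exact h1
      · have e : pvRunBefore (a :: rest) ((a :: rest).length) = pvRunBefore rest rest.length := by
          simp only [pvRunBefore, List.length_cons, List.take_succ_cons, List.take_length,
            List.reverse_cons]
          rw [pvStop_one _ _ haf]
        rw [e] at htail
        exact htail


-- splitOnMax.go skips a separator-free prefix, char by char
theorem pvGo_skip (pre : List Char) (hpre : '=' ∉ pre) :
    ∀ (f m : Nat) (l cur : List Char) (acc : List (List Char)), m ≠ 0 → pre.length ≤ f →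
      PySem.Chars.splitOnMax.go ['='] f m (pre ++ l) cur acc =
        PySem.Chars.splitOnMax.go ['='] (f - pre.length) m l (pre.reverse ++ cur) acc := by
  induction pre with
  | nil => intro f m l cur acc _ _; simp
  | cons c pre' ih =>
    intro f m l cur acc hm hf
    cases f with
    | zero => simp at hf
    | succ f' =>
      have hc : c ≠ '=' := fun h => hpre (by simp [h])
      have hpre' : '=' ∉ pre' := fun h => hpre (by simp [h])
      have hp : List.isPrefixOf ['='] (c :: (pre' ++ l)) = false := by
        simp [List.isPrefixOf]; exact fun h => absurd h.symm hc
      rw [show ((c :: pre') ++ l) = c :: (pre' ++ l) from rfl, PySem.Chars.splitOnMax.go]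
      simp only [if_neg hm, hp, Bool.false_eq_true, if_false]
      rw [ih hpre' f' m l (c :: cur) acc hm (by simpa using hf)]
      simp [Nat.succ_sub_succ]

-- splitOnMax.go with maxsplit exhausted returns the remainder
theorem pvGo_mzero (f : Nat) (l cur : List Char) (acc : List (List Char)) :
    PySem.Chars.splitOnMax.go ['='] f 0 l cur acc = ((cur.reverse ++ l) :: acc).reverse := by
  cases f with
  | zero => rw [PySem.Chars.splitOnMax.go]
  | succ f' =>
    cases l with
    | nil => rw [PySem.Chars.splitOnMax.go]; simp; omega
    | cons c rest => rw [PySem.Chars.splitOnMax.go]; simp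

-- splitOnMax.go meeting the separator with one split left
theorem pvGo_hit (f m : Nat) (rest cur : List Char) (acc : List (List Char)) (hm : m ≠ 0) :
    PySem.Chars.splitOnMax.go ['='] (f + 1) m ('=' :: rest) cur acc =
      PySem.Chars.splitOnMax.go ['='] f (m - 1) rest [] (cur.reverse :: acc) := by
  rw [PySem.Chars.splitOnMax.go]
  simp [hm, List.isPrefixOf]

-- a.split("=", 1) when a = "--config=" ++ t splits exactly at the prefix's '='
theorem pvSplit_config (t : List Char) :
    PySem.Chars.splitOnMax ("--config=".toList ++ t) ['='] 1 = ["--config".toList, t] := by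
  have h9 : "--config=".toList = "--config".toList ++ ['='] := by decide
  have h8 : ("--config".toList : List Char).length = 8 := by decide
  have hnot : '=' ∉ ("--config".toList : List Char) := by decide
  rw [PySem.Chars.splitOnMax, if_neg (by simp)]
  rw [h9, List.append_assoc]
  rw [show ("--config".toList ++ (['='] ++ t) : List Char) = "--config".toList ++ ('=' :: t) from rfl]
  rw [show Int.toNat 1 = 1 from rfl]
  rw [pvGo_skip "--config".toList hnot _ _ ('=' :: t) [] [] (by simp) (by simp)]
  have hF : (("--config".toList ++ ('=' :: t) : List Char).length + 1) - ("--config".toList : List Char).length = (t.length + 1) + 1 := by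
    simp
  rw [hF, pvGo_hit _ _ t _ _ (by simp)]
  rw [pvGo_mzero]
  simp

theorem pvSplit_val (a : String) (h : PySem.Str.startswith a "--config=" = true) :
    ((PySem.Str.splitMax? a "=" 1).getD []).getD 1 "" = String.ofList (a.toList.drop 9) := by
  have h' : ("--config=".toList : List Char) <+: a.toList := by
    rw [PySem.Str.startswith] at h
    exact (PySem.Chars.startswith_iff _ _).mp h
  obtain ⟨t, ht⟩ := h'
  have hsep : ("=" : String).toList = ['='] := by decide
  rw [PySem.Str.splitMax?, PySem.Chars.splitMax?, if_neg (by simp [hsep]), hsep]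
  rw [← ht, pvSplit_config t]
  have hdrop : (("--config=".toList ++ t : List Char)).drop 9 = t := by
    rw [show (9 : Nat) = ("--config=".toList : List Char).length from by decide]
    exact List.drop_left
  simp

theorem pvKey : ∀ (argv : List String) (cfg : Option String) (out : List String),
    pvOkCfg argv = true →
    extract_config_path_go argv cfg out =
      (let st := List.foldl extract_config_path_step (none, cfg, out) argv; (st.2.1, st.2.2))
  | [], _, _, _ => rfl
  | a :: rest, cfg, out, h => by
    by_cases hf : a = "-c" ∨ a = "--config"
    · cases rest with
      | nil =>
        unfold pvOkCfg at h
        simp only [if_pos hf] at h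
        exact absurd h (by simp)
      | cons v rest' =>
        have h' : pvOkCfg rest' = true := by
          unfold pvOkCfg at h
          simpa only [if_pos hf] using h
        rw [extract_config_path_go.eq_def]
        simp only [if_pos hf, List.foldl_cons, extract_config_path_step]
        exact pvKey rest' (some v) out h'
    · have hne_of_hs : PySem.Str.startswith a "--config=" = true → a ≠ "--config=" := by
        intro _ hEq
        rw [hEq] at h
        unfold pvOkCfg at h
        rw [if_neg (by decide : ¬(("--config=" : String) = "-c" ∨ ("--config=" : String) = "--config")),
            if_pos rfl] at h
        exact absurd h (by simp)
      by_cases hs : PySem.Str.startswith a "--config=" = true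
      · have hne : a ≠ "--config=" := hne_of_hs hs
        have h' : pvOkCfg rest = true := by
          unfold pvOkCfg at h
          rwa [if_neg hf, if_neg hne] at h
        have hcne : ((PySem.Str.splitMax? a "=" 1).getD []).getD 1 "" ≠ "" := by
          rw [pvSplit_val a hs]
          intro h0
          apply hne
          have hnil : a.toList.drop 9 = [] := by
            have := congrArg String.toList h0
            simpa using this
          have h'' : ("--config=".toList : List Char) <+: a.toList := by
            rw [PySem.Str.startswith] at hs
            exact (PySem.Chars.startswith_iff _ _).mp hs
          obtain ⟨t, ht⟩ := h''
          have ht0 : t = [] := by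
            have hd : (("--config=".toList ++ t : List Char)).drop 9 = t := by
              rw [show (9 : Nat) = ("--config=".toList : List Char).length from by decide]
              exact List.drop_left
            rw [← ht, hd] at hnil
            exact hnil
          have hta : a.toList = "--config=".toList := by rw [← ht, ht0]; simp
          have := congrArg String.ofList hta
          simpa using this
        rw [extract_config_path_go.eq_def]
        simp only [if_neg hf, if_pos hs]
        rw [if_neg hcne]
        simp only [List.foldl_cons, extract_config_path_step, if_neg hf, if_pos hs]
        exact pvKey rest (some _) out h'
      · have h' : pvOkCfg rest = true := by
          have hne : a ≠ "--config=" := by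
            intro hEq
            rw [hEq] at hs
            exact hs (by decide)
          unfold pvOkCfg at h
          rwa [if_neg hf, if_neg hne] at h
        rw [extract_config_path_go.eq_def]
        simp only [if_neg hf, hs, Bool.false_eq_true, if_false,
          List.foldl_cons, extract_config_path_step]
        exact pvKey rest cfg (out ++ [a]) h'

-- ===== VERDICT (by name: the statement is the Claim_ definition above) =====
theorem extract_config_path_spec : Claim_equal_extract_config_path := by
  intro argv _ hpre
  unfold Spec_extract_config_path extract_config_path extract_config_path_alt
  exact pvKey argv none [] (pvPre_ok argv hpre)
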